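-- pv_equiv track=rewrite | github.com/cirosantilli/project-euler-solutions | solvers/742.py | area_from_half_edges
-- ===== SOURCE A (Python) =====
-- from typing import List, Tuple
--
-- def area_from_half_edges(half_edges: List[Tuple[int, int]]) -> int:
--     """
--     For a centrally symmetric polygon, the full area equals the sum of determinants
--     over all ordered pairs in the half-cycle, which is equal to:
--         sum_j det(prefix_sum_before_j, edge_j)
--     This is O(m).
--     """
--     px = 0
--     py = 0
--     area = 0
--     for dx, dy in half_edges:
--         area += px * dy - py * dx
--         px += dx
--         py += dy
--     return area
-- ===== SOURCE B (Python) =====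
-- from typing import List, Tuple
--
-- def area_from_half_edges(half_edges: List[Tuple[int, int]]) -> int:
--     # Materialize the vertex list via prefix sums, then apply the shoelace
--     # sum over consecutive vertex pairs in a separate pass.
--     verts = [(0, 0)]
--     px = py = 0
--     for dx, dy in half_edges:
--         px += dx
--         py += dy
--         verts.append((px, py))
--     return sum(x1 * y2 - y1 * x2 for (x1, y1), (x2, y2) in zip(verts, verts[1:]))
-- ===== Notes on version B (the rewrite author's own statement) =====
-- stated objective: alternative
-- what changed: B materializes the polygon's vertex list by prefix-summing the edges and then computes the cross-product sum in a second pairwise (zip with tail) pass, instead of A's single loop with a running prefix point.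
import Mathlib
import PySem

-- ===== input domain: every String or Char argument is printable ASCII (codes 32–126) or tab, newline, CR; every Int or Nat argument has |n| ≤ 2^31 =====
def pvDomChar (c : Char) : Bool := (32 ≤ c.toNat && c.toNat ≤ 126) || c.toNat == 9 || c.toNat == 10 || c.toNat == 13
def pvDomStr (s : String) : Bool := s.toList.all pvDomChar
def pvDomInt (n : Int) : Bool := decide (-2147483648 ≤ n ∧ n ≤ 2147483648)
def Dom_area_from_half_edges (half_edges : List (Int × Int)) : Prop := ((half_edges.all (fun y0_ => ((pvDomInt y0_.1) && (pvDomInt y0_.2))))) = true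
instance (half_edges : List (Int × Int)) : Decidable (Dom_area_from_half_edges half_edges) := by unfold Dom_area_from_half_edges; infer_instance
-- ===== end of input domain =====

-- B builds the explicit vertex list by prefix-summing the edges, then sums cross
-- products over consecutive vertex pairs in a separate pass (same O(m) cost).

-- ===== PORT A =====
-- single loop with running prefix point (px, py) and accumulator area
def area_from_half_edges (half_edges : List (Int × Int)) : Int :=
  (half_edges.foldl
    (fun (s : Int × Int × Int) e =>
      (s.1 + e.1, s.2.1 + e.2, s.2.2 + (s.1 * e.2 - s.2.1 * e.1)))
    (0, 0, 0)).2.2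

-- ===== PORT B =====
-- the vertices appended after (0,0): running prefix sums of the edges
def pvVertsFrom : Int → Int → List (Int × Int) → List (Int × Int)
  | _, _, [] => []
  | px, py, (dx, dy) :: rest => (px + dx, py + dy) :: pvVertsFrom (px + dx) (py + dy) rest

def area_from_half_edges_alt (half_edges : List (Int × Int)) : Int :=
  let verts : List (Int × Int) := (0, 0) :: pvVertsFrom 0 0 half_edges
  ((verts.zip verts.tail).map
    (fun p => p.1.1 * p.2.2 - p.1.2 * p.2.1)).sum

-- ===== PRECONDITION & SPEC =====
def Spec_area_from_half_edges (half_edges : List (Int × Int)) (out : Int) : Prop := out = area_from_half_edges_alt half_edges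
instance (half_edges : List (Int × Int)) (out : Int) : Decidable (Spec_area_from_half_edges half_edges out) := by unfold Spec_area_from_half_edges; infer_instance

-- ===== CLAIM (what is proved, stated in full; the proofs are below) =====
def Claim_equal_area_from_half_edges : Prop := ∀ (half_edges : List (Int × Int)), Dom_area_from_half_edges half_edges → Spec_area_from_half_edges half_edges (area_from_half_edges half_edges)

-- ===== LEMMAS AND PROOFS =====
theorem pv_key (hs : List (Int × Int)) : ∀ (px py area : Int),
    (hs.foldl
      (fun (s : Int × Int × Int) e =>
        (s.1 + e.1, s.2.1 + e.2, s.2.2 + (s.1 * e.2 - s.2.1 * e.1)))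
      (px, py, area)).2.2
    =
    area + (((((px, py) : Int × Int) :: pvVertsFrom px py hs).zip (pvVertsFrom px py hs)).map
      (fun p => p.1.1 * p.2.2 - p.1.2 * p.2.1)).sum := by
  induction hs with
  | nil => intro px py area; simp [pvVertsFrom]
  | cons e rest ih =>
    intro px py area
    obtain ⟨dx, dy⟩ := e
    simp only [List.foldl, pvVertsFrom, List.zip_cons_cons, List.map_cons, List.sum_cons]
    rw [ih]
    ring

-- ===== VERDICT (by name: the statement is the Claim_ definition above) =====
theorem area_from_half_edges_spec : Claim_equal_area_from_half_edges := by
  intro hs _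
  unfold Spec_area_from_half_edges area_from_half_edges area_from_half_edges_alt
  simpa using pv_key hs 0 0 0
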